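-- pv_equiv track=rewrite | github.com/yso009/1day-1solve | programmers/전화번호 목록 (P).py | solution
-- ===== SOURCE A (Python) =====
-- def solution(pb):
--     pb.sort()
--     x = 0
--     for i in range(1,len(pb)):
--         if pb[0] == pb[i][0:len(pb[0])]:
--             x = x +1
--         else:
--             x = x
--     if x == 0:
--         answer = True
--         return answer
--     if x > 0 :
--         answer = False
--         return answer
-- ===== SOURCE B (Python) =====
-- def solution(pb):
--     pb.sort()
--     if len(pb) < 2:
--         return True
--     return not pb[1].startswith(pb[0])
-- ===== Notes on version B (the rewrite author's own statement) =====
-- stated objective: simpler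
-- what changed: Instead of scanning every later element and counting those that have the sorted minimum pb[0] as a prefix, B sorts and tests only the single adjacent neighbour with pb[1].startswith(pb[0]), relying on contiguity of prefix-extensions in sorted order.
import Mathlib
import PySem

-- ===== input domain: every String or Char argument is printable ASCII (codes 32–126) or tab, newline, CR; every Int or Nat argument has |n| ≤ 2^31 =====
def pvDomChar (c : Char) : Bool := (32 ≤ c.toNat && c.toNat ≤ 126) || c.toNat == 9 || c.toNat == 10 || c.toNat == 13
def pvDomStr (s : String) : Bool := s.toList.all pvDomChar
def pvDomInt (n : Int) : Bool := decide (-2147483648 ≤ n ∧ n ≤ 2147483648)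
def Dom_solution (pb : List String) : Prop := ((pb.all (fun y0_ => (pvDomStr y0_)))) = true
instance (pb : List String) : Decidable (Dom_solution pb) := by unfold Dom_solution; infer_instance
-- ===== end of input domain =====

-- B replaces A's full counting scan over all later elements by a single adjacent
-- startswith test after sorting (contiguity of prefix-extensions in sorted order);
-- both sort, so the in-place mutation of the argument is the same. Return-value equivalence is what is proved.


-- ===== PORT A =====
def solution (pb : List String) : Bool :=
  let pbs := PySem.List.sorted pb (fun s => s)             -- pb.sort()
  let x : Int := (PySem.List.pyRange 1 (PySem.List.len pbs)).foldl
    (fun x i =>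
      if PySem.List.pyGetD pbs 0 "" =
          PySem.Str.slice (PySem.List.pyGetD pbs i "") (some 0) (some (PySem.Str.len (PySem.List.pyGetD pbs 0 "")))
      then x + 1 else x) 0
  if x = 0 then true else false                            -- x > 0 branch: the only other case

-- ===== PORT B =====
def solution_alt (pb : List String) : Bool :=
  let pbs := PySem.List.sorted pb (fun s => s)             -- pb.sort()
  if PySem.List.len pbs < 2 then true
  else !(PySem.Str.startswith (PySem.List.pyGetD pbs 1 "") (PySem.List.pyGetD pbs 0 ""))

-- ===== PRECONDITION & SPEC =====
def Spec_solution (pb : List String) (out : Bool) : Prop := out = solution_alt pb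
instance (pb : List String) (out : Bool) : Decidable (Spec_solution pb out) := by unfold Spec_solution; infer_instance

-- ===== CLAIM (what is proved, stated in full; the proofs are below) =====
def Claim_equal_solution : Prop := ∀ (pb : List String), Dom_solution pb → Spec_solution pb (solution pb)

-- ===== LEMMAS AND PROOFS =====

-- A's slice-equality test 'pb[0] == pb[i][0:len(pb[0])]' is exactly 'pb[i].startswith(pb[0])'.
lemma slice_test_iff (a s : String) :
    (a = PySem.Str.slice s (some 0) (some (PySem.Str.len a))) ↔ PySem.Str.startswith s a = true := by
  rw [← String.toList_inj, PySem.Str.startswith_eq, PySem.Chars.startswith_iff,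
      List.prefix_iff_eq_take]
  simp [PySem.Str.slice, PySem.Str.len, PySem.Chars.slice_eq_listSlice]

-- A's loop body is a count of the elements passing the test.
lemma fold_eq_countP (a : String) (l : List String) (init : Int) :
    l.foldl (fun x s =>
      if a = PySem.Str.slice s (some 0) (some (PySem.Str.len a)) then x + 1 else x) init
    = init + (l.countP (fun s => PySem.Str.startswith s a) : Int) := by
  induction l generalizing init with
  | nil => simp
  | cons hd tl ih =>
      rw [List.foldl_cons, List.countP_cons, ih]
      by_cases h : a = PySem.Str.slice hd (some 0) (some (PySem.Str.len a))
      · rw [if_pos h]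
        have hb : PySem.Str.startswith hd a = true := (slice_test_iff a hd).mp h
        simp only [hb, if_true]
        push_cast; ring
      · rw [if_neg h]
        have hb : PySem.Str.startswith hd a = false := by
          rcases Bool.eq_false_or_eq_true (PySem.Str.startswith hd a) with ht | hf
          · exact absurd ((slice_test_iff a hd).mpr ht) h
          · exact hf
        rw [PySem.Str.startswith_eq] at hb
        simp [hb]

-- Sorted contiguity: a prefix of something above l2 that is itself above l1 is a prefix of l2.
lemma prefix_of_between {α : Type} [LinearOrder α] :
    ∀ (l1 l2 l3 : List α), ¬ l2 < l1 → ¬ l3 < l2 → l1 <+: l3 → l1 <+: l2 := by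
  intro l1
  induction l1 with
  | nil => intro _ _ _ _ _; exact List.nil_prefix
  | cons x t1 ih =>
      intro l2 l3 h1 h2 hp
      obtain ⟨t3, rfl⟩ : ∃ t3, l3 = x :: t3 := by
        rcases hp with ⟨r, hr⟩
        exact ⟨t1 ++ r, by simpa using hr.symm⟩
      cases l2 with
      | nil => exact absurd (List.nil_lt_cons x t1) h1
      | cons y t2 =>
          have hxy : x = y := by
            rcases lt_trichotomy x y with h | h | h
            · exact absurd (List.cons_lt_cons_iff.mpr (Or.inl h)) h2
            · exact h
            · exact absurd (List.cons_lt_cons_iff.mpr (Or.inl h)) h1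
          subst hxy
          have h1' : ¬ t2 < t1 := fun h => h1 (List.cons_lt_cons_iff.mpr (Or.inr ⟨rfl, h⟩))
          have h2' : ¬ t3 < t2 := fun h => h2 (List.cons_lt_cons_iff.mpr (Or.inr ⟨rfl, h⟩))
          have hp' : t1 <+: t3 := by
            rcases hp with ⟨r, hr⟩
            exact ⟨r, by simpa using hr⟩
          exact List.cons_prefix_cons.mpr ⟨rfl, ih t2 t3 h1' h2' hp'⟩

-- The whole equivalence, stated on the sorted list.
lemma core (pbs : List String) (hpair : pbs.Pairwise (fun a b => a ≤ b)) :
    (let x : Int := (PySem.List.pyRange 1 (PySem.List.len pbs)).foldl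
      (fun x i =>
        if PySem.List.pyGetD pbs 0 "" =
            PySem.Str.slice (PySem.List.pyGetD pbs i "") (some 0) (some (PySem.Str.len (PySem.List.pyGetD pbs 0 "")))
        then x + 1 else x) 0;
     if x = 0 then true else false)
    = (if PySem.List.len pbs < 2 then true
       else !(PySem.Str.startswith (PySem.List.pyGetD pbs 1 "") (PySem.List.pyGetD pbs 0 ""))) := by
  show (if ((PySem.List.pyRange 1 (PySem.List.len pbs)).foldl
      (fun x i =>
        (fun (x : Int) (s : String) =>
          if PySem.List.pyGetD pbs 0 "" =
              PySem.Str.slice s (some 0) (some (PySem.Str.len (PySem.List.pyGetD pbs 0 "")))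
          then x + 1 else x) x (PySem.List.pyGetD pbs i "")) 0) = 0 then true else false) = _
  rw [PySem.List.foldl_pyRange_pyGetD pbs ""
      (fun (x : Int) (s : String) =>
        if PySem.List.pyGetD pbs 0 "" =
            PySem.Str.slice s (some 0) (some (PySem.Str.len (PySem.List.pyGetD pbs 0 "")))
        then x + 1 else x) 0 (by norm_num)]
  match pbs, hpair with
  | [], _ => simp [PySem.List.len]
  | [a], _ => simp [PySem.List.len, PySem.List.pyGetD, PySem.List.pyGet?, PySem.List.pyIdx?]
  | a :: b :: rest, hpair =>
      have h0 : PySem.List.pyGetD (a :: b :: rest) 0 "" = a := by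
        simp [PySem.List.pyGetD, PySem.List.pyGet?, PySem.List.pyIdx?,
          show ((0:Int) ≤ (rest.length:Int) + 1) from by positivity]
      have h1 : PySem.List.pyGetD (a :: b :: rest) 1 "" = b := by
        norm_num [PySem.List.pyGetD, PySem.List.pyGet?, PySem.List.pyIdx?]
      have hlen : ¬ PySem.List.len (a :: b :: rest) < 2 := by
        simp [PySem.List.len]
      rw [h0, h1, if_neg hlen]
      show (if ((b :: rest).foldl
          (fun x s => if a = PySem.Str.slice s (some 0) (some (PySem.Str.len a)) then x + 1 else x) 0) = 0
          then true else false) = !(PySem.Str.startswith b a)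
      simp only [fold_eq_countP]
      by_cases hsb : PySem.Str.startswith b a = true
      · have hpos : 0 < (b :: rest).countP (fun s => PySem.Str.startswith s a) :=
          List.countP_pos_iff.mpr ⟨b, List.mem_cons_self, hsb⟩
        rw [if_neg (by omega), hsb]
        rfl
      · have hzero : (b :: rest).countP (fun s => PySem.Str.startswith s a) = 0 := by
          rw [List.countP_eq_zero]
          intro s hs hp
          have hprefix_s : a.toList <+: s.toList := by
            rw [PySem.Str.startswith_eq, PySem.Chars.startswith_iff] at hp
            exact hp
          have hab : a ≤ b := (List.pairwise_cons.mp hpair).1 b (List.mem_cons_self)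
          have hbs : b ≤ s := by
            rcases List.mem_cons.mp hs with rfl | hs'
            · exact le_refl s
            · exact (List.pairwise_cons.mp (List.pairwise_cons.mp hpair).2).1 s hs'
          have hnb : ¬ b.toList < a.toList :=
            fun hh => (not_lt.mpr hab) (String.lt_iff_toList_lt.mpr hh)
          have hns : ¬ s.toList < b.toList :=
            fun hh => (not_lt.mpr hbs) (String.lt_iff_toList_lt.mpr hh)
          have : a.toList <+: b.toList := prefix_of_between _ _ _ hnb hns hprefix_s
          exact hsb (by rw [PySem.Str.startswith_eq, PySem.Chars.startswith_iff]; exact this)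
        rw [if_pos (by omega)]
        rw [PySem.Str.startswith_eq] at hsb
        simp only [Bool.not_eq_true] at hsb
        simp [hsb]

-- ===== VERDICT (by name: the statement is the Claim_ definition above) =====
theorem solution_spec : Claim_equal_solution := by
  intro pb _
  show solution pb = solution_alt pb
  unfold solution solution_alt
  exact core (PySem.List.sorted pb (fun s => s)) (PySem.List.sorted_pairwise pb (fun s => s))
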